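-- pv_equiv track=rewrite | github.com/code10086web/interview_test | 图达通/problem_2.py | find_stone_pairs
-- ===== SOURCE A (Python) =====
-- def find_stone_pairs(stones, d):
--     # 步骤1：创建一个空字典，用于存储石头重量和索引
--     stone_dict = {}
--     for i in range(len(stones)):
--         if stones[i] not in stone_dict:
--             stone_dict[stones[i]] = []
--         stone_dict[stones[i]].append(i)
--
--     # 步骤2：查找所有重量差为D的石头对
--     stone_pairs = set()
--     for i in range(len(stones)):
--         if (stones[i] + d) in stone_dict:
--             for j in stone_dict[stones[i] + d]:
--                 if i != j:
--                     stone_pairs.add(tuple(sorted([i, j])))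
--         if (stones[i] - d) in stone_dict:
--             for j in stone_dict[stones[i] - d]:
--                 if i != j:
--                     stone_pairs.add(tuple(sorted([i, j])))
--
--     # 步骤3：将索引对的集合转换为包含实际石头重量的元组集合
--     result = set()
--     for pair in stone_pairs:
--         weight_pair = tuple(sorted([stones[pair[0]], stones[pair[1]]]))
--         result.add(weight_pair)
--
--     return result
-- ===== SOURCE B (Python) =====
-- def find_stone_pairs(stones, d):
--     # one pass to count each weight, one pass over weights; no index pairs at all
--     count = {}
--     for w in stones:
--         count[w] = count.get(w, 0) + 1
--     result = set()
--     for w in stones: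
--         for t in (w + d, w - d):
--             if t in count and (t != w or count[w] >= 2):
--                 result.add((min(w, t), max(w, t)))
--     return result
-- ===== Notes on version B (the rewrite author's own statement) =====
-- stated objective: faster
-- what changed: A groups all indices per weight, enumerates matching index pairs with a nested loop over the per-weight index lists, and maps the index-pair set to weight pairs; B builds one count dict and, in a single pass, adds (min(w,t),max(w,t)) for t=w±d directly from count lookups (d=0 handled via count>=2), never materialising index pairs.
import Mathlib
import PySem

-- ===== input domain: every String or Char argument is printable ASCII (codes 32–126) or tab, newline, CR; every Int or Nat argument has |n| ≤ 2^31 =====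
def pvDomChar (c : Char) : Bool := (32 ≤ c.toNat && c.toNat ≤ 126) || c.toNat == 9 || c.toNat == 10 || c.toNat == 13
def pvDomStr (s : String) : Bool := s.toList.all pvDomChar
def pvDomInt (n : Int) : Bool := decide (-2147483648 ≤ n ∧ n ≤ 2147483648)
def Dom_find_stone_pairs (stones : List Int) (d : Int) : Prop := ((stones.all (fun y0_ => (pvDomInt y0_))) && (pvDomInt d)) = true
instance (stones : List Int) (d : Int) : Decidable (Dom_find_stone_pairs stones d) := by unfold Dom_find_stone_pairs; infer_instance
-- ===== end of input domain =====

-- B replaces A's dict-of-index-lists and quadratic index-pair enumeration by a single counting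
-- dict and one pass of count lookups (objective: faster; the outputs are Python sets, the
-- equivalence proved is equality of the two ports' result lists).

-- ===== PORT A =====
def find_stone_pairs (stones : List Int) (d : Int) : List (Int × Int) :=
  let n : Int := PySem.List.len stones
  let stone_dict : PySem.Dict Int (List Int) :=
    (PySem.List.pyRange 0 n).foldl (fun dd i =>
      let w := PySem.List.pyGetD stones i 0
      let dd := if dd.contains w then dd else dd.insert w ([] : List Int)
      dd.modify w [] (fun l => l ++ [i])) PySem.Dict.empty
  let stone_pairs : PySem.Set (Int × Int) :=
    (PySem.List.pyRange 0 n).foldl (fun s i =>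
      let w := PySem.List.pyGetD stones i 0
      let s :=
        if stone_dict.contains (w + d) then
          (stone_dict.getD (w + d) []).foldl
            (fun s j => if i ≠ j then PySem.Set.add s (if j < i then (j, i) else (i, j)) else s) s
        else s
      if stone_dict.contains (w - d) then
        (stone_dict.getD (w - d) []).foldl
          (fun s j => if i ≠ j then PySem.Set.add s (if j < i then (j, i) else (i, j)) else s) s
      else s) PySem.Set.empty
  stone_pairs.foldl (fun r p =>
    let a := PySem.List.pyGetD stones p.1 0
    let b := PySem.List.pyGetD stones p.2 0
    PySem.Set.add r (if b < a then (b, a) else (a, b))) PySem.Set.empty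


-- ===== PORT B =====
def find_stone_pairs_alt (stones : List Int) (d : Int) : List (Int × Int) :=
  let count : PySem.Dict Int Int :=
    stones.foldl (fun c w => c.insert w (c.getD w 0 + 1)) PySem.Dict.empty
  stones.foldl (fun r w =>
    [w + d, w - d].foldl (fun r t =>
      if count.contains t && (decide (t ≠ w) || decide (2 ≤ count.getD w 0)) then
        PySem.Set.add r (min w t, max w t)
      else r) r) PySem.Set.empty


-- ===== PRECONDITION & SPEC =====
def Spec_find_stone_pairs (stones : List Int) (d : Int) (out : List (Int × Int)) : Prop := out = find_stone_pairs_alt stones d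
instance (stones : List Int) (d : Int) (out : List (Int × Int)) : Decidable (Spec_find_stone_pairs stones d out) := by unfold Spec_find_stone_pairs; infer_instance

-- ===== CLAIM (what is proved, stated in full; the proofs are below) =====
def Claim_equal_find_stone_pairs : Prop := ∀ (stones : List Int) (d : Int), Dom_find_stone_pairs stones d → Spec_find_stone_pairs stones d (find_stone_pairs stones d)

-- ===== LEMMAS AND PROOFS =====
-- ===== proof-side helpers =====
def pvOcc (stones : List Int) (t : Int) : List Int :=
  (PySem.List.pyRange 0 (PySem.List.len stones)).filter (fun i => PySem.List.pyGetD stones i 0 == t)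

def pvEm (stones : List Int) (i t : Int) : List (Int × Int) :=
  ((pvOcc stones t).filter (fun j => decide (i ≠ j))).map (fun j => if j < i then (j, i) else (i, j))

def pvE (stones : List Int) (d : Int) : List (Int × Int) :=
  (PySem.List.pyRange 0 (PySem.List.len stones)).flatMap
    (fun i => pvEm stones i (PySem.List.pyGetD stones i 0 + d) ++ pvEm stones i (PySem.List.pyGetD stones i 0 - d))

def pvF (stones : List Int) (p : Int × Int) : Int × Int :=
  let a := PySem.List.pyGetD stones p.1 0
  let b := PySem.List.pyGetD stones p.2 0
  if b < a then (b, a) else (a, b)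

def pvStep (stones : List Int) (d : Int) (r : PySem.Set (Int × Int)) (w : Int) : PySem.Set (Int × Int) :=
  [w + d, w - d].foldl (fun r t =>
    if (PySem.Dict.counter stones).contains t
        && (decide (t ≠ w) || decide (2 ≤ (PySem.Dict.counter stones).getD w 0)) then
      PySem.Set.add r (min w t, max w t)
    else r) r

-- B-side reduction
lemma alt_eq_foldl (stones : List Int) (d : Int) :
    find_stone_pairs_alt stones d = stones.foldl (pvStep stones d) PySem.Set.empty := by
  simp only [find_stone_pairs_alt, PySem.Dict.foldl_insert_getD_add_one_eq_counter]
  rfl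

-- step-1 dict: one step
lemma step_getD (dd : PySem.Dict Int (List Int)) (i t w : Int) :
    ((if dd.contains w then dd else dd.insert w ([] : List Int)).modify w [] (fun l => l ++ [i])).getD t []
      = if t = w then dd.getD t [] ++ [i] else dd.getD t [] := by
  by_cases hc : dd.contains w
  · rw [if_pos hc, PySem.Dict.getD_modify]
    split_ifs with h
    · subst h; rfl
    · rfl
  · simp only [Bool.not_eq_true] at hc
    rw [if_neg (by simp [hc]), PySem.Dict.getD_modify]
    split_ifs with h
    · subst h
      rw [PySem.Dict.getD_insert, if_pos rfl, PySem.Dict.getD_of_not_contains _ _ hc]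
    · rw [PySem.Dict.getD_insert, if_neg h]

-- step-1 dict: whole fold
lemma dict_getD (stones : List Int) (l : List Int) (dd : PySem.Dict Int (List Int)) (t : Int) :
    (l.foldl (fun dd i =>
        (if dd.contains (PySem.List.pyGetD stones i 0) then dd
         else dd.insert (PySem.List.pyGetD stones i 0) ([] : List Int)).modify
          (PySem.List.pyGetD stones i 0) [] (fun l => l ++ [i])) dd).getD t []
      = dd.getD t [] ++ l.filter (fun i => PySem.List.pyGetD stones i 0 == t) := by
  induction l generalizing dd with
  | nil => simp
  | cons i l ih =>
    rw [List.foldl_cons, ih, step_getD]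
    by_cases h : PySem.List.pyGetD stones i 0 = t
    · simp [h]
    · simp [h, Ne.symm h]

-- fold of updates = update of flatMap
lemma foldl_update_eq_flatMap {α β : Type} [BEq α] (l : List β) (h : β → List α) (s : PySem.Set α) :
    l.foldl (fun s i => PySem.Set.update s (h i)) s = PySem.Set.update s (l.flatMap h) := by
  induction l generalizing s with
  | nil => simp [PySem.Set.update]
  | cons x l ih => rw [List.foldl_cons, ih, List.flatMap_cons, PySem.Set.update_append]

-- ofList ∘ map ∘ ofList collapse
lemma ofList_map_ofList {α β : Type} [BEq α] [LawfulBEq α] [BEq β] [LawfulBEq β] (E : List α) (f : α → β) :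
    PySem.Set.ofList ((PySem.Set.ofList E).map f) = PySem.Set.ofList (E.map f) := by
  induction E using List.reverseRecOn with
  | nil => rfl
  | append_singleton E x ih =>
    by_cases hx : x ∈ E
    · rw [PySem.Set.ofList_append_singleton, PySem.Set.add_of_mem (by simpa [PySem.Set.mem_ofList] using hx),
        ih, List.map_append, List.map_singleton, PySem.Set.ofList_append_singleton,
        PySem.Set.add_of_mem (by simp [PySem.Set.mem_ofList]; exact ⟨x, hx, rfl⟩)]
    · rw [PySem.Set.ofList_append_singleton, PySem.Set.add_of_not_mem (by simpa [PySem.Set.mem_ofList] using hx),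
        List.map_append, List.map_singleton, PySem.Set.ofList_append_singleton, ih,
        List.map_append, List.map_singleton, PySem.Set.ofList_append_singleton]

-- update with a constant list
lemma update_replicate {α : Type} [BEq α] [LawfulBEq α] (k : Nat) (c : α) (s : PySem.Set α) :
    PySem.Set.update s (List.replicate k c) = if k = 0 then s else PySem.Set.add s c := by
  induction k generalizing s with
  | zero => simp [PySem.Set.update]
  | succ k ih =>
    rw [List.replicate_succ, PySem.Set.update_cons, ih]
    by_cases hk : k = 0
    · simp [hk]
    · simp only [hk, if_false, if_neg (Nat.succ_ne_zero k)]
      rw [PySem.Set.add_of_mem (by simp [PySem.Set.mem_add])]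


-- one conditional inner loop of step 2 is an update with pvEm
lemma slot_eq (stones : List Int) (DD : PySem.Dict Int (List Int))
    (h : ∀ t, DD.getD t [] = pvOcc stones t) (s : PySem.Set (Int × Int)) (i t : Int) :
    (if DD.contains t then
        (DD.getD t []).foldl
          (fun s j => if i ≠ j then PySem.Set.add s (if j < i then (j, i) else (i, j)) else s) s
      else s)
      = PySem.Set.update s (pvEm stones i t) := by
  by_cases hc : DD.contains t
  · rw [if_pos hc, h t, PySem.List.foldl_ite_eq_foldl_filter (p := fun j => i ≠ j),
      ← PySem.Set.update_map_eq_foldl_add]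
    rfl
  · simp only [Bool.not_eq_true] at hc
    have h0 : pvOcc stones t = [] := by rw [← h t, PySem.Dict.getD_of_not_contains _ _ hc]
    rw [if_neg (by simp [hc]), pvEm, h0]
    rfl

lemma step2_eq (stones : List Int) (d : Int) (DD : PySem.Dict Int (List Int))
    (h : ∀ t, DD.getD t [] = pvOcc stones t) :
    ((PySem.List.pyRange 0 (PySem.List.len stones)).foldl (fun s i =>
      if DD.contains (PySem.List.pyGetD stones i 0 - d) then
        (DD.getD (PySem.List.pyGetD stones i 0 - d) []).foldl
          (fun s j => if i ≠ j then PySem.Set.add s (if j < i then (j, i) else (i, j)) else s)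
          (if DD.contains (PySem.List.pyGetD stones i 0 + d) then
            (DD.getD (PySem.List.pyGetD stones i 0 + d) []).foldl
              (fun s j => if i ≠ j then PySem.Set.add s (if j < i then (j, i) else (i, j)) else s) s
          else s)
      else
        (if DD.contains (PySem.List.pyGetD stones i 0 + d) then
            (DD.getD (PySem.List.pyGetD stones i 0 + d) []).foldl
              (fun s j => if i ≠ j then PySem.Set.add s (if j < i then (j, i) else (i, j)) else s) s
          else s)) PySem.Set.empty)
      = PySem.Set.ofList (pvE stones d) := by
  rw [PySem.List.foldl_congr_mem _ _
      (fun s i => PySem.Set.update s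
        (pvEm stones i (PySem.List.pyGetD stones i 0 + d) ++ pvEm stones i (PySem.List.pyGetD stones i 0 - d))) _
      (by
        intro acc i _
        beta_reduce
        rw [PySem.Set.update_append, ← slot_eq stones DD h acc i (PySem.List.pyGetD stones i 0 + d),
          ← slot_eq stones DD h _ i (PySem.List.pyGetD stones i 0 - d)]),
    foldl_update_eq_flatMap, PySem.Set.update_empty]
  rfl

lemma step3_eq (stones : List Int) (P : List (Int × Int)) :
    (P.foldl (fun r p =>
        PySem.Set.add r
          (if PySem.List.pyGetD stones p.2 0 < PySem.List.pyGetD stones p.1 0 then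
            (PySem.List.pyGetD stones p.2 0, PySem.List.pyGetD stones p.1 0)
          else (PySem.List.pyGetD stones p.1 0, PySem.List.pyGetD stones p.2 0))) PySem.Set.empty)
      = PySem.Set.ofList (P.map (pvF stones)) := by
  rw [show (P.map (pvF stones)) = P.map (fun p =>
      (if PySem.List.pyGetD stones p.2 0 < PySem.List.pyGetD stones p.1 0 then
        (PySem.List.pyGetD stones p.2 0, PySem.List.pyGetD stones p.1 0)
      else (PySem.List.pyGetD stones p.1 0, PySem.List.pyGetD stones p.2 0))) from rfl,
    ← PySem.Set.update_nil_left, PySem.Set.update_map_eq_foldl_add]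
  rfl

lemma A_eq (stones : List Int) (d : Int) :
    find_stone_pairs stones d = PySem.Set.ofList ((pvE stones d).map (pvF stones)) := by
  simp only [find_stone_pairs]
  generalize hD : (List.foldl (fun dd i =>
      (if dd.contains (PySem.List.pyGetD stones i 0) then dd
       else dd.insert (PySem.List.pyGetD stones i 0) ([] : List Int)).modify
        (PySem.List.pyGetD stones i 0) [] (fun l => l ++ [i])) PySem.Dict.empty
      (PySem.List.pyRange 0 (PySem.List.len stones))) = DD
  have h : ∀ t, DD.getD t [] = pvOcc stones t := by
    intro t
    rw [← hD, dict_getD]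
    simp [pvOcc]
  rw [step2_eq stones d DD h, step3_eq, ofList_map_ofList]


lemma len_occ (stones : List Int) (t : Int) : (pvOcc stones t).length = stones.count t := by
  calc (pvOcc stones t).length
      = List.countP (fun i => PySem.List.pyGetD stones i 0 == t)
          (PySem.List.pyRange 0 (PySem.List.len stones)) := List.countP_eq_length_filter.symm
    _ = List.countP (fun x => x == t)
          ((PySem.List.pyRange 0 (PySem.List.len stones)).map (fun j => PySem.List.pyGetD stones j 0)) := by
        rw [List.countP_map]; rfl
    _ = stones.count t := by rw [PySem.List.map_pyGetD_pyRange_zero]; exact List.count_eq_countP.symm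

lemma nodup_occ (stones : List Int) (t : Int) : (pvOcc stones t).Nodup := by
  apply List.Nodup.filter
  have h : PySem.List.len stones = ((stones.length : Nat) : Int) := rfl
  rw [h, PySem.List.pyRange_zero_natCast]
  exact (List.nodup_range).map (fun a b hab => by omega)

lemma mem_occ (stones : List Int) (t i : Int) :
    i ∈ pvOcc stones t ↔ i ∈ PySem.List.pyRange 0 (PySem.List.len stones) ∧ PySem.List.pyGetD stones i 0 = t := by
  simp [pvOcc, List.mem_filter]

lemma len_filter_occ (stones : List Int) (i t : Int)
    (hi : i ∈ PySem.List.pyRange 0 (PySem.List.len stones)) :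
    ((pvOcc stones t).filter (fun j => decide (i ≠ j))).length
      = stones.count t - (if t = PySem.List.pyGetD stones i 0 then 1 else 0) := by
  have hfe : (pvOcc stones t).filter (fun j => decide (i ≠ j)) = (pvOcc stones t).erase i := by
    rw [List.Nodup.erase_eq_filter (nodup_occ stones t)]
    apply List.filter_congr
    intro j _
    by_cases hij : i = j
    · simp [hij]
    · simp [hij, Ne.symm hij]
  rw [hfe]
  by_cases h : t = PySem.List.pyGetD stones i 0
  · have hm : i ∈ pvOcc stones t := (mem_occ stones t i).mpr ⟨hi, h.symm⟩
    rw [List.length_erase_of_mem hm, len_occ, if_pos h]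
  · have hm : i ∉ pvOcc stones t := fun hmem => h (((mem_occ stones t i).mp hmem).2.symm)
    rw [List.erase_of_not_mem hm, len_occ, if_neg h]
    omega

lemma map_pvF_em (stones : List Int) (i t : Int) :
    (pvEm stones i t).map (pvF stones)
      = List.replicate ((pvOcc stones t).filter (fun j => decide (i ≠ j))).length
          (min (PySem.List.pyGetD stones i 0) t, max (PySem.List.pyGetD stones i 0) t) := by
  rw [pvEm, List.map_map, ← List.map_const']
  apply List.map_congr_left
  intro j hj
  have ht : PySem.List.pyGetD stones j 0 = t :=
    ((mem_occ stones t j).mp (List.mem_of_mem_filter hj)).2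
  simp only [Function.comp_apply]
  by_cases hlt : j < i <;>
    simp only [hlt, if_true, if_false, pvF, ht] <;>
    split_ifs <;> simp only [Prod.mk.injEq] <;> constructor <;> omega

lemma slot_cond (stones : List Int) (i t : Int)
    (hi : i ∈ PySem.List.pyRange 0 (PySem.List.len stones)) (s : PySem.Set (Int × Int)) :
    (if ((pvOcc stones t).filter (fun j => decide (i ≠ j))).length = 0 then s
     else PySem.Set.add s (min (PySem.List.pyGetD stones i 0) t, max (PySem.List.pyGetD stones i 0) t))
    = (if ((PySem.Dict.counter stones).contains t
          && (decide (t ≠ PySem.List.pyGetD stones i 0)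
              || decide (2 ≤ (PySem.Dict.counter stones).getD (PySem.List.pyGetD stones i 0) 0))) = true
       then PySem.Set.add s (min (PySem.List.pyGetD stones i 0) t, max (PySem.List.pyGetD stones i 0) t)
       else s) := by
  rw [len_filter_occ stones i t hi, PySem.Dict.contains_counter, PySem.Dict.getD_counter]
  have hmem : t ∈ stones ↔ 0 < stones.count t := List.count_pos_iff.symm
  simp only [Bool.and_eq_true, Bool.or_eq_true, decide_eq_true_eq, List.contains_iff_mem]
  by_cases h : t = PySem.List.pyGetD stones i 0
  · rw [if_pos h]
    by_cases hc : 2 ≤ stones.count t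
    · rw [if_neg (by omega),
        if_pos ⟨hmem.mpr (by omega), Or.inr (by rw [← h]; exact_mod_cast hc)⟩]
    · rw [if_pos (by omega), if_neg ?_]
      rintro ⟨hm, hne | hcnt⟩
      · exact hne h
      · rw [← h] at hcnt
        have : (2 : Int) ≤ (stones.count t : Int) := hcnt
        omega
  · rw [if_neg h]
    by_cases hc : t ∈ stones
    · rw [if_neg (by have := hmem.mp hc; omega), if_pos ⟨hc, Or.inl h⟩]
    · have hz : stones.count t = 0 := by
        by_contra hz
        exact hc (hmem.mpr (by omega))
      rw [if_pos (by omega), if_neg (fun hh => hc hh.1)]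

lemma E_reduce (stones : List Int) (d : Int) :
    PySem.Set.ofList ((pvE stones d).map (pvF stones)) = stones.foldl (pvStep stones d) PySem.Set.empty := by
  rw [pvE, List.map_flatMap]
  simp only [List.map_append, map_pvF_em]
  rw [← PySem.Set.update_empty, ← foldl_update_eq_flatMap]
  rw [PySem.List.foldl_congr_mem _ _
      (fun s i => pvStep stones d s (PySem.List.pyGetD stones i 0)) _
      (by
        intro acc i hi
        beta_reduce
        rw [PySem.Set.update_append, update_replicate, update_replicate]
        simp only [pvStep, List.foldl_cons, List.foldl_nil]
        rw [slot_cond stones i (PySem.List.pyGetD stones i 0 + d) hi acc,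
          slot_cond stones i (PySem.List.pyGetD stones i 0 - d) hi])]
  rw [← List.foldl_map (f := fun i => PySem.List.pyGetD stones i 0) (g := pvStep stones d),
    PySem.List.map_pyGetD_pyRange_zero]


-- ===== VERDICT (by name: the statement is the Claim_ definition above) =====
theorem find_stone_pairs_spec : Claim_equal_find_stone_pairs := by
  intro stones d _
  unfold Spec_find_stone_pairs
  rw [A_eq, E_reduce, alt_eq_foldl]
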